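-- pv_equiv track=rewrite | github.com/LinMoQC/LyraNote | apps/api/app/services/desktop_runtime_service.py | _normalize_fts_query
-- ===== SOURCE A (Python) =====
-- def _normalize_fts_query(query: str) -> str:
--     cleaned = (
--         query.replace('"', " ")
--         .replace("'", " ")
--         .replace(":", " ")
--         .replace("*", " ")
--         .replace("(", " ")
--         .replace(")", " ")
--     )
--     tokens = [token.strip() for token in cleaned.split() if token.strip()]
--     return " ".join(tokens) if tokens else query.strip()
-- ===== SOURCE B (Python) =====
-- def _normalize_fts_query(query: str) -> str:
--     tokens = []
--     buf = []
--     for ch in query: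
--         if ch.isspace() or ch in '"\':*()':
--             if buf:
--                 tokens.append("".join(buf))
--                 buf = []
--         else:
--             buf.append(ch)
--     if buf:
--         tokens.append("".join(buf))
--     return " ".join(tokens) if tokens else query.strip()
-- ===== Notes on version B (the rewrite author's own statement) =====
-- stated objective: alternative
-- what changed: Replaced the six-pass replace pipeline plus split/strip/filter by a single character-by-character scan that maintains a token buffer and emits tokens at separators.
import Mathlib
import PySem

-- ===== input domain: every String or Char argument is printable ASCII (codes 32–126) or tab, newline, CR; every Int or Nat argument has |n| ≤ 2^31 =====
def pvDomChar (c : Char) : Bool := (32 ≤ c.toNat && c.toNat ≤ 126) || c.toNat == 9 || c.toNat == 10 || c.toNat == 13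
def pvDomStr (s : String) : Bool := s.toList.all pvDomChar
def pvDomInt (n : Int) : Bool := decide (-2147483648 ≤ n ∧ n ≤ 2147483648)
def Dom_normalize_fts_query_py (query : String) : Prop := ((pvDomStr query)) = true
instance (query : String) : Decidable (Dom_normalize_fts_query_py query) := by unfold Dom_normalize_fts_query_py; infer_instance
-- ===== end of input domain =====

-- B replaces A's six-pass replace pipeline plus split/strip/filter by a single
-- character-by-character scan with a token buffer (alternative decomposition, same cost).

-- ===== PORT A =====
def normalize_fts_query_py (query : String) : String :=
  let cleaned :=
    PySem.Str.replace
      (PySem.Str.replace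
        (PySem.Str.replace
          (PySem.Str.replace
            (PySem.Str.replace
              (PySem.Str.replace query "\"" " ")
              "'" " ")
            ":" " ")
          "*" " ")
        "(" " ")
      ")" " "
  let tokens := ((PySem.Str.split₀ cleaned).filter
      (fun t => PySem.Str.strip t != "")).map PySem.Str.strip
  if tokens.isEmpty then PySem.Str.strip query else PySem.Str.join " " tokens

-- ===== PORT B =====
-- separator: whitespace or one of the six special characters (Source B's `ch.isspace() or ch in '"\':*()'`)
def pvSepB (c : Char) : Bool :=
  PySem.Chars.isspace c ||
    (c == '"' || c == '\'' || c == ':' || c == '*' || c == '(' || c == ')')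

-- the single-pass scan of Source B: `toks` = tokens emitted so far, `buf` = current token buffer
def pvScanB : List Char → List String → List Char → List String
  | [], toks, buf => if buf.isEmpty then toks else toks ++ [String.ofList buf]
  | c :: rest, toks, buf =>
    if pvSepB c then
      if buf.isEmpty then pvScanB rest toks []
      else pvScanB rest (toks ++ [String.ofList buf]) []
    else pvScanB rest toks (buf ++ [c])

def normalize_fts_query_py_alt (query : String) : String :=
  let tokens := pvScanB query.toList [] []
  if tokens.isEmpty then PySem.Str.strip query else PySem.Str.join " " tokens

-- ===== PRECONDITION & SPEC =====
def Spec_normalize_fts_query_py (query : String) (out : String) : Prop := out = normalize_fts_query_py_alt query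
instance (query : String) (out : String) : Decidable (Spec_normalize_fts_query_py query out) := by unfold Spec_normalize_fts_query_py; infer_instance

-- ===== CLAIM (what is proved, stated in full; the proofs are below) =====
def Claim_equal_normalize_fts_query_py : Prop := ∀ (query : String), Dom_normalize_fts_query_py query → Spec_normalize_fts_query_py query (normalize_fts_query_py query)

-- ===== LEMMAS AND PROOFS =====

-- proof-side helpers
def pvRepl (a c : Char) : Char := if c = a then ' ' else c

def pvF6 (c : Char) : Char :=
  pvRepl ')' (pvRepl '(' (pvRepl '*' (pvRepl ':' (pvRepl '\'' (pvRepl '"' c)))))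

theorem pv_replace_go_one (a b : Char) :
    ∀ (n : Nat) (l acc : List Char), l.length ≤ n →
      PySem.Chars.replace.go [a] [b] n l acc
        = acc.reverse ++ l.map (fun c => if c = a then b else c) := by
  intro n
  induction n with
  | zero =>
    intro l acc h
    have : l = [] := List.eq_nil_of_length_eq_zero (Nat.le_zero.mp h)
    subst this
    simp [PySem.Chars.replace.go]
  | succ n ih =>
    intro l acc h
    cases l with
    | nil => simp [PySem.Chars.replace.go]
    | cons c t =>
      by_cases hc : c = a
      · subst hc
        have hp : [c].isPrefixOf (c :: t) = true := by
          simp [List.isPrefixOf]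
        have hd : List.drop [c].length (c :: t) = t := by simp
        simp only [PySem.Chars.replace.go, hp, if_pos, hd]
        rw [ih t _ (by simpa using Nat.le_of_succ_le_succ h)]
        simp
      · have hp : [a].isPrefixOf (c :: t) = false := by
          simp [List.isPrefixOf]
          exact fun h' => (hc h'.symm).elim
        simp only [PySem.Chars.replace.go, hp, Bool.false_eq_true, if_false]
        rw [ih t _ (by simpa using Nat.le_of_succ_le_succ h)]
        simp [hc]

theorem pv_replace_one (a b : Char) (s : List Char) :
    PySem.Chars.replace s [a] [b] = s.map (fun c => if c = a then b else c) := by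
  have hne : ([a] : List Char).isEmpty = false := by simp
  unfold PySem.Chars.replace
  rw [hne]
  simp only [Bool.false_eq_true, if_false]
  exact pv_replace_go_one a b s.length s [] le_rfl

-- cleaned string = map pvF6
theorem pv_cleaned_toList (query : String) :
    (PySem.Str.replace
      (PySem.Str.replace
        (PySem.Str.replace
          (PySem.Str.replace
            (PySem.Str.replace
              (PySem.Str.replace query "\"" " ")
              "'" " ")
            ":" " ")
          "*" " ")
        "(" " ")
      ")" " ").toList = query.toList.map pvF6 := by
  simp only [PySem.Str.toList_replace]
  have h1 : ("\"" : String).toList = ['"'] := by decide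
  have h2 : ("'" : String).toList = ['\''] := by decide
  have h3 : (":" : String).toList = [':'] := by decide
  have h4 : ("*" : String).toList = ['*'] := by decide
  have h5 : ("(" : String).toList = ['('] := by decide
  have h6 : (")" : String).toList = [')'] := by decide
  have hsp : (" " : String).toList = [' '] := by decide
  rw [h1, h2, h3, h4, h5, h6, hsp]
  simp only [pv_replace_one, List.map_map]
  apply List.map_congr_left
  intro c _
  simp [Function.comp, pvF6, pvRepl]

theorem pv_isspace_f6 (c : Char) :
    PySem.Chars.isspace (pvF6 c) = pvSepB c := by
  by_cases h1 : c = '"'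
  · subst h1; decide
  by_cases h2 : c = '\''
  · subst h2; decide
  by_cases h3 : c = ':'
  · subst h3; decide
  by_cases h4 : c = '*'
  · subst h4; decide
  by_cases h5 : c = '('
  · subst h5; decide
  by_cases h6 : c = ')'
  · subst h6; decide
  unfold pvF6 pvRepl pvSepB
  simp [h1, h2, h3, h4, h5, h6]

theorem pv_f6_of_not_sep (c : Char) (h : pvSepB c = false) : pvF6 c = c := by
  have h1 : c ≠ '"' := by intro e; subst e; exact absurd h (by decide)
  have h2 : c ≠ '\'' := by intro e; subst e; exact absurd h (by decide)
  have h3 : c ≠ ':' := by intro e; subst e; exact absurd h (by decide)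
  have h4 : c ≠ '*' := by intro e; subst e; exact absurd h (by decide)
  have h5 : c ≠ '(' := by intro e; subst e; exact absurd h (by decide)
  have h6 : c ≠ ')' := by intro e; subst e; exact absurd h (by decide)
  unfold pvF6 pvRepl
  simp [h1, h2, h3, h4, h5, h6]

-- scan/split correspondence at the character level
theorem pv_scan_go : ∀ (rest : List Char) (toks : List String) (buf : List Char),
    (pvScanB rest toks buf).map String.toList
      = PySem.Chars.split₀.go (rest.map pvF6) buf.reverse ((toks.map String.toList).reverse) := by
  intro rest
  induction rest with
  | nil =>
    intro toks buf
    simp only [pvScanB, List.map_nil, PySem.Chars.split₀.go]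
    by_cases hb : buf.isEmpty
    · simp [List.isEmpty_iff.mp hb]
    · have : buf.reverse.isEmpty = false := by
        simp_all [List.isEmpty_iff]
      simp [hb, this, String.toList_ofList]
  | cons c rest ih =>
    intro toks buf
    simp only [pvScanB, List.map_cons, PySem.Chars.split₀.go, pv_isspace_f6]
    by_cases hs : pvSepB c
    · by_cases hb : buf.isEmpty
      · have hb' : buf.reverse.isEmpty = true := by simp_all [List.isEmpty_iff]
        simp only [hs, if_pos, hb, hb']
        simpa using ih toks []
      · have hb' : buf.reverse.isEmpty = false := by simp_all [List.isEmpty_iff]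
        simp only [hs, if_pos, hb, hb', Bool.false_eq_true, if_false]
        rw [ih (toks ++ [String.ofList buf]) []]
        simp [String.toList_ofList]
    · simp only [hs, Bool.false_eq_true, if_false]
      rw [pv_f6_of_not_sep c (by simpa using hs), ih toks (buf ++ [c])]
      simp

-- tokens produced by split₀ are nonempty and whitespace-free
theorem pv_split_go_prop : ∀ (s cur : List Char) (acc : List (List Char)),
    cur.all (fun c => !PySem.Chars.isspace c) = true →
    (∀ t ∈ acc, t ≠ [] ∧ t.all (fun c => !PySem.Chars.isspace c) = true) →
    ∀ t ∈ PySem.Chars.split₀.go s cur acc, t ≠ [] ∧ t.all (fun c => !PySem.Chars.isspace c) = true := by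
  intro s
  induction s with
  | nil =>
    intro cur acc hcur hacc t ht
    simp only [PySem.Chars.split₀.go] at ht
    by_cases hc : cur.isEmpty
    · rw [if_pos hc] at ht
      exact hacc t (List.mem_reverse.mp ht)
    · rw [if_neg hc] at ht
      rcases List.mem_cons.mp (List.mem_reverse.mp ht) with h | h
      · subst h
        constructor
        · simp_all [List.isEmpty_iff]
        · simpa using hcur
      · exact hacc t h
  | cons c rest ih =>
    intro cur acc hcur hacc t ht
    simp only [PySem.Chars.split₀.go] at ht
    by_cases hs : PySem.Chars.isspace c
    · rw [if_pos hs] at ht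
      by_cases hc : cur.isEmpty
      · rw [if_pos hc] at ht
        exact ih [] acc (by simp) hacc t ht
      · rw [if_neg hc] at ht
        refine ih [] _ (by simp) ?_ t ht
        intro u hu
        rcases List.mem_cons.mp hu with h | h
        · subst h
          exact ⟨by simp_all [List.isEmpty_iff], by simpa using hcur⟩
        · exact hacc u h
    · rw [if_neg hs] at ht
      exact ih (c :: cur) acc (by simp [hs, hcur]) hacc t ht

theorem pv_dropWhile_no_space (l : List Char)
    (h : l.all (fun c => !PySem.Chars.isspace c) = true) :
    l.dropWhile PySem.Chars.isspace = l := by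
  cases l with
  | nil => rfl
  | cons c t =>
    have : PySem.Chars.isspace c = false := by simp_all
    simp [List.dropWhile, this]

theorem pv_toList_injective : Function.Injective String.toList := by
  intro a b h
  exact String.toList_inj.mp h

theorem pv_strip_id (t : String)
    (h : t.toList.all (fun c => !PySem.Chars.isspace c) = true) :
    PySem.Str.strip t = t := by
  apply pv_toList_injective
  rw [PySem.Str.toList_strip]
  unfold PySem.Chars.strip PySem.Chars.lstrip PySem.Chars.rstrip
  rw [pv_dropWhile_no_space _ h, pv_dropWhile_no_space _ (by simpa using h), List.reverse_reverse]

-- ===== VERDICT (by name: the statement is the Claim_ definition above) =====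
theorem normalize_fts_query_py_spec : Claim_equal_normalize_fts_query_py := by
  intro query _
  unfold Spec_normalize_fts_query_py normalize_fts_query_py normalize_fts_query_py_alt
  have hclean := pv_cleaned_toList query
  set cleaned := PySem.Str.replace
      (PySem.Str.replace
        (PySem.Str.replace
          (PySem.Str.replace
            (PySem.Str.replace
              (PySem.Str.replace query "\"" " ")
              "'" " ")
            ":" " ")
          "*" " ")
        "(" " ")
      ")" " " with hc
  -- every split₀ token is nonempty and whitespace-free
  have hprop : ∀ t ∈ PySem.Str.split₀ cleaned,
      t ≠ "" ∧ t.toList.all (fun c => !PySem.Chars.isspace c) = true := by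
    intro t ht
    have hmem : t.toList ∈ PySem.Chars.split₀ cleaned.toList := by
      rw [← PySem.Str.split₀_map_toList]
      exact List.mem_map_of_mem ht
    have := pv_split_go_prop cleaned.toList [] [] (by simp) (by simp) t.toList
      (by simpa [PySem.Chars.split₀] using hmem)
    refine ⟨?_, this.2⟩
    intro h
    subst h
    exact this.1 rfl
  -- A's filter/map collapses to split₀ itself
  have htokA : ((PySem.Str.split₀ cleaned).filter
      (fun t => PySem.Str.strip t != "")).map PySem.Str.strip
        = PySem.Str.split₀ cleaned := by
    have hfil : (PySem.Str.split₀ cleaned).filter (fun t => PySem.Str.strip t != "")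
        = PySem.Str.split₀ cleaned := by
      apply List.filter_eq_self.mpr
      intro t ht
      rw [pv_strip_id t (hprop t ht).2]
      simpa using (hprop t ht).1
    rw [hfil]
    calc (PySem.Str.split₀ cleaned).map PySem.Str.strip
        = (PySem.Str.split₀ cleaned).map id :=
          List.map_congr_left (fun t ht => pv_strip_id t (hprop t ht).2)
      _ = PySem.Str.split₀ cleaned := List.map_id _
  -- split₀ of cleaned = B's scan
  have htokB : PySem.Str.split₀ cleaned = pvScanB query.toList [] [] := by
    apply List.map_injective_iff.mpr pv_toList_injective
    rw [PySem.Str.split₀_map_toList, hclean, pv_scan_go query.toList [] []]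
    rfl
  rw [htokB] at htokA
  simp only [htokB, htokA]
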